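-- pv_equiv track=rewrite | github.com/weijie-lee/cpp_class | tools/transforms.py | _clean_comment_block
-- ===== SOURCE A (Python) =====
-- def _clean_comment_block(body: str) -> str:
--     """Remove leading ' * ' from C-block-comment lines."""
--     out = []
--     for line in body.splitlines():
--         stripped = line.lstrip()
--         if stripped.startswith("*"):
--             stripped = stripped[1:]
--             if stripped.startswith(" "):
--                 stripped = stripped[1:]
--         out.append(stripped.rstrip())
--     # Trim trailing blank lines.
--     while out and not out[-1].strip():
--         out.pop()
--     while out and not out[0].strip():
--         out.pop(0)
--     return "\n".join(out)
-- ===== SOURCE B (Python) =====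
-- def _clean_comment_block(body: str) -> str:
--     """Remove leading ' * ' from C-block-comment lines (single accumulator pass,
--     no intermediate list, no pop loops)."""
--     result = None   # None until the first non-blank cleaned line
--     pending = 0     # blank cleaned lines seen since the last non-blank one
--     for line in body.splitlines():
--         s = line.lstrip()
--         if s.startswith("* "):
--             s = s[2:]
--         elif s.startswith("*"):
--             s = s[1:]
--         s = s.rstrip()
--         if not s:
--             pending += 1
--         elif result is None:
--             result = s
--             pending = 0
--         else:
--             result = result + "\n" * (pending + 1) + s
--             pending = 0
--     return result if result is not None else ""
-- ===== Notes on version B (the rewrite author's own statement) =====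
-- stated objective: simpler
-- what changed: B replaces A's build-a-list-then-two-while-pop trimming passes with a single accumulator pass that joins non-blank cleaned lines on the fly, buffering blank runs in a pending counter so leading/trailing blanks are never materialised.
import Mathlib
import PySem

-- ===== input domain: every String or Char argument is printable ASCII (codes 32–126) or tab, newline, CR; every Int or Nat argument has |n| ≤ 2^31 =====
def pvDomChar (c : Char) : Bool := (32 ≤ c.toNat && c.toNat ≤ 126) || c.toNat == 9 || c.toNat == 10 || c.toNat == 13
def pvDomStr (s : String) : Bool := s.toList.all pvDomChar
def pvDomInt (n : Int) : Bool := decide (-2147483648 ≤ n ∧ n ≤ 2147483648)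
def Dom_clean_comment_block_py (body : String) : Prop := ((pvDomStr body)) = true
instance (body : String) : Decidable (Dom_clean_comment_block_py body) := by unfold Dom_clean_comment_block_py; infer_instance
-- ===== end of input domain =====

-- B replaces A's list-plus-two-pop-loops with a single accumulator pass (simpler decomposition; same O(n) cost).

-- ===== PORT A =====
-- per-line cleaning, exactly A's branch order
def pvCleanLineA (line : List Char) : List Char :=
  let stripped := PySem.Chars.lstrip line
  let stripped :=
    if PySem.Chars.startswith stripped ['*'] then
      let s := PySem.Chars.slice stripped (some 1) none
      if PySem.Chars.startswith s [' '] then PySem.Chars.slice s (some 1) none else s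
    else stripped
  PySem.Chars.rstrip stripped

-- 'while out and not out[-1].strip(): out.pop()'
def pvTrimTrail : List (List Char) → List (List Char)
  | [] => []
  | x :: xs =>
    match pvTrimTrail xs with
    | [] => if PySem.Chars.strip x = [] then [] else [x]
    | r => x :: r

-- 'while out and not out[0].strip(): out.pop(0)'
def pvTrimLead : List (List Char) → List (List Char)
  | [] => []
  | x :: xs => if PySem.Chars.strip x = [] then pvTrimLead xs else x :: xs

def clean_comment_block_py (body : String) : String :=
  String.ofList (PySem.Chars.join ['\n']
    (pvTrimLead (pvTrimTrail ((PySem.Chars.splitlines body.toList).map pvCleanLineA))))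

-- ===== PORT B =====
def pvCleanLineB (line : List Char) : List Char :=
  let s := PySem.Chars.lstrip line
  let s :=
    if PySem.Chars.startswith s ['*', ' '] then PySem.Chars.slice s (some 2) none
    else if PySem.Chars.startswith s ['*'] then PySem.Chars.slice s (some 1) none
    else s
  PySem.Chars.rstrip s

-- one fold step: state = (result so far, pending blank-line count)
def pvStepB (st : Option (List Char) × Nat) (line : List Char) : Option (List Char) × Nat :=
  let s := pvCleanLineB line
  if s = [] then (st.1, st.2 + 1)
  else
    match st.1 with
    | none => (some s, 0)
    | some r => (some (r ++ List.replicate (st.2 + 1) '\n' ++ s), 0)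

def clean_comment_block_py_alt (body : String) : String :=
  match ((PySem.Chars.splitlines body.toList).foldl pvStepB (none, 0)).1 with
  | none => ""
  | some r => String.ofList r

-- ===== PRECONDITION & SPEC =====
def Spec_clean_comment_block_py (body : String) (out : String) : Prop := out = clean_comment_block_py_alt body
instance (body : String) (out : String) : Decidable (Spec_clean_comment_block_py body out) := by unfold Spec_clean_comment_block_py; infer_instance

-- ===== CLAIM (what is proved, stated in full; the proofs are below) =====
def Claim_equal_clean_comment_block_py : Prop := ∀ (body : String), Dom_clean_comment_block_py body → Spec_clean_comment_block_py body (clean_comment_block_py body)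

-- ===== LEMMAS AND PROOFS =====

-- the two per-line cleaners agree
theorem pvCleanLine_eq (t : List Char) : pvCleanLineB t = pvCleanLineA t := by
  unfold pvCleanLineA pvCleanLineB
  have h1 : ∀ s : List Char, PySem.List.slice s (some 1) none = s.drop 1 := by
    intro s
    have := PySem.List.slice_from s (a := 1) (by norm_num)
    simpa using this
  have h2 : ∀ s : List Char, PySem.List.slice s (some 2) none = s.drop 2 := by
    intro s
    have := PySem.List.slice_from s (a := 2) (by norm_num)
    simpa using this
  simp only [PySem.Chars.slice, h1, h2]
  generalize PySem.Chars.lstrip t = s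
  cases s with
  | nil => simp [PySem.Chars.startswith, List.isPrefixOf]
  | cons c cs =>
    cases cs with
    | nil =>
      rcases eq_or_ne c '*' with hc | hc
      · subst hc; simp [PySem.Chars.startswith, List.isPrefixOf]
      · have hc' := Ne.symm hc
        simp [PySem.Chars.startswith, List.isPrefixOf, hc']
    | cons d ds =>
      rcases eq_or_ne c '*' with hc | hc
      · subst hc
        rcases eq_or_ne d ' ' with hd | hd
        · subst hd; simp [PySem.Chars.startswith, List.isPrefixOf]
        · have hd' := Ne.symm hd
          simp [PySem.Chars.startswith, List.isPrefixOf, hd']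
      · have hc' := Ne.symm hc
        simp [PySem.Chars.startswith, List.isPrefixOf, hc']

theorem rstrip_eq_nil_iff (u : List Char) :
    PySem.Chars.rstrip u = [] ↔ ∀ c ∈ u, PySem.Chars.isspace c = true := by
  simp [PySem.Chars.rstrip, List.dropWhile_eq_nil_iff]

-- a cleaned line is blank (strip = []) iff it is empty
theorem strip_cleanA_eq_nil_iff (t : List Char) :
    (PySem.Chars.strip (pvCleanLineA t) = []) ↔ pvCleanLineA t = [] := by
  constructor
  · intro h
    have hA : ∃ v, pvCleanLineA t = PySem.Chars.rstrip v := by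
      unfold pvCleanLineA; exact ⟨_, rfl⟩
    obtain ⟨v, hv⟩ := hA
    rw [hv] at h ⊢
    -- strip (rstrip v) = [] ⇒ every char of rstrip v is whitespace
    have hall : ∀ c ∈ PySem.Chars.rstrip v, PySem.Chars.isspace c = true := by
      have h' := h
      rw [PySem.Chars.strip, rstrip_eq_nil_iff] at h'
      -- h' : all of lstrip (rstrip v) is space; the dropped prefix is space too
      intro c hc
      have hsplit : PySem.Chars.rstrip v =
          (PySem.Chars.rstrip v).takeWhile PySem.Chars.isspace ++
          PySem.Chars.lstrip (PySem.Chars.rstrip v) := by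
        simp [PySem.Chars.lstrip]
      rw [hsplit] at hc
      rcases List.mem_append.mp hc with h1 | h2
      · exact List.mem_takeWhile_imp h1
      · exact h' c h2
    -- rstrip result cannot be a nonempty all-whitespace list
    by_contra hne
    rw [PySem.Chars.rstrip] at hne hall
    have hrev : List.dropWhile PySem.Chars.isspace v.reverse ≠ [] := by
      intro h0; simp [h0] at hne
    have hhead := List.head_dropWhile_not (l := v.reverse) PySem.Chars.isspace hrev
    have hmem : (List.dropWhile PySem.Chars.isspace v.reverse).head hrev ∈
        (List.dropWhile PySem.Chars.isspace v.reverse).reverse := by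
      simp [List.head_mem]
    have := hall _ hmem
    simp [this] at hhead
  · intro h; simp [h, PySem.Chars.strip, PySem.Chars.lstrip, PySem.Chars.rstrip]

theorem join_cons_ne (a : List Char) (l : List (List Char)) (h : l ≠ []) :
    PySem.Chars.join ['\n'] (a :: l) = a ++ '\n' :: PySem.Chars.join ['\n'] l := by
  cases l with
  | nil => exact absurd rfl h
  | cons b t => rw [PySem.Chars.join_cons_cons]; simp

theorem join_replicate_nil (p : Nat) (l : List (List Char)) (h : l ≠ []) :
    PySem.Chars.join ['\n'] (List.replicate p [] ++ l) =
      List.replicate p '\n' ++ PySem.Chars.join ['\n'] l := by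
  induction p with
  | zero => simp
  | succ q ih =>
    rw [List.replicate_succ, List.cons_append, join_cons_ne, ih, List.replicate_succ]
    · simp
    · intro h0
      rcases List.append_eq_nil_iff.mp h0 with ⟨_, h2⟩
      exact h h2

-- the fold from a started accumulator
theorem foldl_some (ls : List (List Char)) : ∀ (r : List Char) (p : Nat),
    (ls.foldl pvStepB (some r, p)).1 = some (
      if pvTrimTrail (ls.map pvCleanLineA) = [] then r
      else PySem.Chars.join ['\n'] (r :: (List.replicate p [] ++ pvTrimTrail (ls.map pvCleanLineA)))) := by
  induction ls with
  | nil => intro r p; simp [pvTrimTrail]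
  | cons x ls ih =>
    intro r p
    have hline := pvCleanLine_eq x
    by_cases h : pvCleanLineA x = []
    · rw [List.foldl_cons]
      have hstep : pvStepB (some r, p) x = (some r, p + 1) := by
        simp [pvStepB, hline, h]
      have htt : pvTrimTrail (List.map pvCleanLineA (x :: ls)) =
          if pvTrimTrail (ls.map pvCleanLineA) = [] then []
          else [] :: pvTrimTrail (ls.map pvCleanLineA) := by
        simp only [List.map_cons, pvTrimTrail, h]
        cases htt' : pvTrimTrail (ls.map pvCleanLineA) with
        | nil => simp [PySem.Chars.strip, PySem.Chars.lstrip, PySem.Chars.rstrip]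
        | cons a t => simp
      rw [hstep, ih, htt]
      rcases eq_or_ne (pvTrimTrail (ls.map pvCleanLineA)) [] with h' | h'
      · simp [h']
      · have hne : ([] :: pvTrimTrail (ls.map pvCleanLineA)) ≠ ([] : List (List Char)) := by simp
        simp only [if_neg h', if_neg hne]
        rw [List.replicate_succ', List.append_assoc]
        simp
    · rw [List.foldl_cons]
      have hstep : pvStepB (some r, p) x =
          (some (r ++ List.replicate (p + 1) '\n' ++ pvCleanLineA x), 0) := by
        simp [pvStepB, hline, h]
      have htt : pvTrimTrail (List.map pvCleanLineA (x :: ls)) =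
          pvCleanLineA x :: pvTrimTrail (ls.map pvCleanLineA) := by
        simp only [List.map_cons, pvTrimTrail]
        cases htt' : pvTrimTrail (ls.map pvCleanLineA) with
        | nil =>
          have := (not_iff_not.mpr (strip_cleanA_eq_nil_iff x)).mpr h
          simp [this]
        | cons a t => simp
      rw [hstep, ih, htt]
      have hne : (pvCleanLineA x :: pvTrimTrail (ls.map pvCleanLineA)) ≠ ([] : List (List Char)) := by simp
      rw [if_neg hne]
      rcases eq_or_ne (pvTrimTrail (ls.map pvCleanLineA)) [] with h' | h'
      · rw [if_pos h', h']
        rw [join_cons_ne _ _ (by simp), join_replicate_nil _ _ (by simp),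
          PySem.Chars.join_singleton, List.replicate_succ]
        simp
      · rw [if_neg h']
        simp only [List.replicate_zero, List.nil_append]
        rw [join_cons_ne _ _ h',
          join_cons_ne _ _ (by simp),
          join_replicate_nil _ _ (by simp),
          join_cons_ne _ _ h',
          List.replicate_succ]
        simp

-- the fold from the initial state computes A's trimmed join
theorem foldl_none (ls : List (List Char)) : ∀ (p : Nat),
    ((ls.foldl pvStepB (none, p)).1).getD [] =
    PySem.Chars.join ['\n'] (pvTrimLead (pvTrimTrail (ls.map pvCleanLineA))) := by
  induction ls with
  | nil => intro p; simp [pvTrimTrail, pvTrimLead, PySem.Chars.join_nil]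
  | cons x ls ih =>
    intro p
    have hline := pvCleanLine_eq x
    by_cases h : pvCleanLineA x = []
    · rw [List.foldl_cons]
      have hstep : pvStepB (none, p) x = (none, p + 1) := by
        simp [pvStepB, hline, h]
      rw [hstep, ih]
      congr 1
      simp only [List.map_cons, pvTrimTrail, h]
      cases htt' : pvTrimTrail (ls.map pvCleanLineA) with
      | nil => simp [PySem.Chars.strip, PySem.Chars.lstrip, PySem.Chars.rstrip, pvTrimLead]
      | cons a t =>
        simp [pvTrimLead, PySem.Chars.strip, PySem.Chars.lstrip, PySem.Chars.rstrip]
    · rw [List.foldl_cons]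
      have hstep : pvStepB (none, p) x = (some (pvCleanLineA x), 0) := by
        simp [pvStepB, hline, h]
      rw [hstep, foldl_some]
      simp only [Option.getD_some]
      have hstrip := (not_iff_not.mpr (strip_cleanA_eq_nil_iff x)).mpr h
      have htl : pvTrimLead (pvTrimTrail (List.map pvCleanLineA (x :: ls))) =
          pvCleanLineA x :: pvTrimTrail (ls.map pvCleanLineA) := by
        simp only [List.map_cons, pvTrimTrail]
        cases htt' : pvTrimTrail (ls.map pvCleanLineA) with
        | nil => simp [hstrip, pvTrimLead]
        | cons a t => simp [pvTrimLead, hstrip]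
      rw [htl]
      rcases eq_or_ne (pvTrimTrail (ls.map pvCleanLineA)) [] with h' | h'
      · rw [if_pos h', h', PySem.Chars.join_singleton]
      · rw [if_neg h']
        simp

-- ===== VERDICT (by name: the statement is the Claim_ definition above) =====
theorem clean_comment_block_py_spec : Claim_equal_clean_comment_block_py := by
  intro body _
  unfold Spec_clean_comment_block_py
  have halt : clean_comment_block_py_alt body =
      String.ofList ((((PySem.Chars.splitlines body.toList).foldl pvStepB (none, 0)).1).getD []) := by
    unfold clean_comment_block_py_alt
    cases ((PySem.Chars.splitlines body.toList).foldl pvStepB (none, 0)).1 <;> rfl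
  rw [halt, foldl_none]
  rfl
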